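-- pv_equiv track=rewrite | github.com/shasankp000/Lexis | lexis_r/compress.py | _strip_sentinel_deltas_per_sentence
-- ===== SOURCE A (Python) =====
-- from typing import Any, cast, Dict, List, Tuple
--
-- def _sentinel_layout(lengths: List[int]) -> List[bool]:
--     layout: List[bool] = []
--     for t_idx, length in enumerate(lengths):
--         layout.append(True)
--         layout.extend([False] * length)
--         layout.append(True)
--         if t_idx < len(lengths) - 1:
--             layout.append(False)
--     return layout
--
-- def _strip_sentinel_deltas_per_sentence(
--     pos_deltas_nested:   List[List[int]],
--     root_lengths_nested: List[List[int]],
-- ) -> Tuple[List[List[int]], List[int]]: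
--     content_nested: List[List[int]] = []
--     for s_idx, sent_deltas in enumerate(pos_deltas_nested):
--         lengths = root_lengths_nested[s_idx] if s_idx < len(root_lengths_nested) else []
--         layout  = _sentinel_layout(lengths)
--         content = [d for d, is_sent in zip(sent_deltas, layout) if not is_sent]
--         content_nested.append(content)
--     content_counts = [len(c) for c in content_nested]
--     return content_nested, content_counts
-- ===== SOURCE B (Python) =====
-- from typing import List, Tuple
--
-- def _strip_one(sent_deltas: List[int], lengths: List[int]) -> List[int]:
--     content: List[int] = []
--     cur = 0
--     last = len(lengths) - 1
--     for t_idx, length in enumerate(lengths):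
--         n = length if length > 0 else 0
--         cur += 1                                   # skip opening sentinel
--         content.extend(sent_deltas[cur:cur + n])   # the token's content block
--         cur += n + 1                               # past block and closing sentinel
--         if t_idx != last:
--             content.extend(sent_deltas[cur:cur + 1])  # the separator element
--             cur += 1
--     return content
--
-- def _strip_sentinel_deltas_per_sentence(
--     pos_deltas_nested:   List[List[int]],
--     root_lengths_nested: List[List[int]],
-- ) -> Tuple[List[List[int]], List[int]]:
--     content_nested = [
--         _strip_one(sent, root_lengths_nested[i] if i < len(root_lengths_nested) else [])
--         for i, sent in enumerate(pos_deltas_nested)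
--     ]
--     return content_nested, [len(c) for c in content_nested]
-- ===== Notes on version B (the rewrite author's own statement) =====
-- stated objective: faster
-- what changed: B drops A's materialised boolean sentinel-layout list and zip-filter entirely; per sentence it walks an integer cursor over the deltas, slicing each token's content block and separator directly from the lengths.
import Mathlib
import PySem

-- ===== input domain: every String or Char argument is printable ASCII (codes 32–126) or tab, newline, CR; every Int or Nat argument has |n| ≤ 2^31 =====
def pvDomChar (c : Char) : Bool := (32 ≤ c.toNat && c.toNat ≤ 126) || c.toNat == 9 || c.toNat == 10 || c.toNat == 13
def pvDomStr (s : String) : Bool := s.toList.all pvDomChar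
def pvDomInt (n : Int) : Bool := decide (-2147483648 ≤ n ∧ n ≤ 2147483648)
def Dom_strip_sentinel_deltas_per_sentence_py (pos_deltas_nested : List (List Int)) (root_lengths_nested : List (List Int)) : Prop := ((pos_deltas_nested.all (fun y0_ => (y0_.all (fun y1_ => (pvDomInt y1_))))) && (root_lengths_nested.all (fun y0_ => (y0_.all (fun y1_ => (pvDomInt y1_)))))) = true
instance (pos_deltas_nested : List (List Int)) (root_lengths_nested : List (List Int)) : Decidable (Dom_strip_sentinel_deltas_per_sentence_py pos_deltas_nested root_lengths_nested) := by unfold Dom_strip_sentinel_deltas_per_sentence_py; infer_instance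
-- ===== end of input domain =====

-- B replaces A's boolean sentinel layout + zip-filter with a single cursor walk that
-- block-slices each token's content directly; no intermediate layout list (measured faster).

-- ===== PORT A =====
-- _sentinel_layout: foldl over enumerate; [False]*length is pyRepeat (negative lengths give []).
def pySentinelLayout (lengths : List Int) : List Bool :=
  (PySem.List.enumerate lengths 0).foldl
    (fun layout p =>
      let layout := layout ++ [true]
      let layout := layout ++ PySem.List.pyRepeat [false] p.2
      let layout := layout ++ [true]
      if p.1 < (lengths.length : Int) - 1 then layout ++ [false] else layout)
    []

def strip_sentinel_deltas_per_sentence_py (pos_deltas_nested : List (List Int)) (root_lengths_nested : List (List Int)) : List (List Int) × List Int :=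
  let content_nested :=
    (PySem.List.enumerate pos_deltas_nested 0).foldl
      (fun acc p =>
        let lengths := if p.1 < (root_lengths_nested.length : Int) then PySem.List.pyGetD root_lengths_nested p.1 [] else []
        let layout := pySentinelLayout lengths
        let content := ((p.2.zip layout).filter (fun q => !q.2)).map (·.1)
        acc ++ [content])
      []
  (content_nested, content_nested.map (fun c => (c.length : Int)))

-- ===== PORT B =====
-- _strip_one: cursor walk; state is (content, cur); slices via PySem.List.slice.
def altStripOne (sent_deltas : List Int) (lengths : List Int) : List Int :=
  let last : Int := (lengths.length : Int) - 1
  ((PySem.List.enumerate lengths 0).foldl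
    (fun (st : List Int × Int) p =>
      let n : Int := if p.2 > 0 then p.2 else 0
      let cur := st.2 + 1
      let content := st.1 ++ PySem.List.slice sent_deltas (some cur) (some (cur + n))
      let cur := cur + n + 1
      if p.1 ≠ last then
        (content ++ PySem.List.slice sent_deltas (some cur) (some (cur + 1)), cur + 1)
      else (content, cur))
    ([], 0)).1

def strip_sentinel_deltas_per_sentence_py_alt (pos_deltas_nested : List (List Int)) (root_lengths_nested : List (List Int)) : List (List Int) × List Int :=
  let content_nested :=
    (PySem.List.enumerate pos_deltas_nested 0).map
      (fun p => altStripOne p.2 (if p.1 < (root_lengths_nested.length : Int) then PySem.List.pyGetD root_lengths_nested p.1 [] else []))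
  (content_nested, content_nested.map (fun c => (c.length : Int)))

-- ===== PRECONDITION & SPEC =====
def Spec_strip_sentinel_deltas_per_sentence_py (pos_deltas_nested : List (List Int)) (root_lengths_nested : List (List Int)) (out : List (List Int) × List Int) : Prop := out = strip_sentinel_deltas_per_sentence_py_alt pos_deltas_nested root_lengths_nested
instance (pos_deltas_nested : List (List Int)) (root_lengths_nested : List (List Int)) (out : List (List Int) × List Int) : Decidable (Spec_strip_sentinel_deltas_per_sentence_py pos_deltas_nested root_lengths_nested out) := by unfold Spec_strip_sentinel_deltas_per_sentence_py; infer_instance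

-- ===== CLAIM (what is proved, stated in full; the proofs are below) =====
def Claim_equal_strip_sentinel_deltas_per_sentence_py : Prop := ∀ (pos_deltas_nested : List (List Int)) (root_lengths_nested : List (List Int)), Dom_strip_sentinel_deltas_per_sentence_py pos_deltas_nested root_lengths_nested → Spec_strip_sentinel_deltas_per_sentence_py pos_deltas_nested root_lengths_nested (strip_sentinel_deltas_per_sentence_py pos_deltas_nested root_lengths_nested)

-- ===== LEMMAS AND PROOFS =====

-- closed form of A's layout
def layoutSpec : List Int → List Bool
  | [] => []
  | [l] => true :: (List.replicate l.toNat false ++ [true])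
  | l :: rest => true :: (List.replicate l.toNat false ++ [true] ++ [false]) ++ layoutSpec rest

-- A's zip-filter content, as a function
def filt (sent : List Int) (layout : List Bool) : List Int :=
  ((sent.zip layout).filter (fun q => !q.2)).map (·.1)

-- closed form of B's cursor walk
def walkSpec (sent : List Int) : Nat → List Int → List Int
  | _, [] => []
  | c, l :: rest =>
    let n := l.toNat
    ((sent.drop (c+1)).take n) ++
      (if rest.isEmpty then []
       else (sent.drop (c+n+2)).take 1 ++ walkSpec sent (c+n+3) rest)

lemma layout_aux (bigL : List Int) :
    ∀ (rest : List Int) (s : Int) (acc : List Bool), s + rest.length = (bigL.length : Int) →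
    (PySem.List.enumerate rest s).foldl
      (fun layout p =>
        let layout := layout ++ [true]
        let layout := layout ++ PySem.List.pyRepeat [false] p.2
        let layout := layout ++ [true]
        if p.1 < (bigL.length : Int) - 1 then layout ++ [false] else layout)
      acc
    = acc ++ layoutSpec rest := by
  intro rest
  induction rest with
  | nil => intro s acc _; simp [PySem.List.enumerate_nil, layoutSpec]
  | cons l rest ih =>
    intro s acc hs
    rw [PySem.List.enumerate_cons]
    simp only [List.foldl_cons]
    cases rest with
    | nil =>
      have hcond : ¬ s < (bigL.length : Int) - 1 := by simp at hs; omega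
      simp [PySem.List.enumerate_nil, hcond, layoutSpec, PySem.List.pyRepeat_singleton]
    | cons r rs =>
      have hcond : s < (bigL.length : Int) - 1 := by simp at hs; omega
      rw [show layoutSpec (l :: r :: rs)
            = (true :: (List.replicate l.toNat false ++ [true] ++ [false])) ++ layoutSpec (r :: rs) from rfl]
      simp only [hcond, if_pos]
      rw [ih (s + 1) _ (by simp at hs ⊢; omega)]
      simp [PySem.List.pyRepeat_singleton]

lemma pySentinelLayout_eq (lengths : List Int) : pySentinelLayout lengths = layoutSpec lengths := by
  unfold pySentinelLayout
  rw [layout_aux lengths lengths 0 [] (by simp)]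
  simp

lemma filt_nil (lay : List Bool) : filt [] lay = [] := by
  simp [filt]

lemma filt_true (sent : List Int) (lay : List Bool) : filt sent (true :: lay) = filt sent.tail lay := by
  cases sent <;> simp [filt]

lemma filt_false (sent : List Int) (lay : List Bool) :
    filt sent (false :: lay) = sent.take 1 ++ filt (sent.drop 1) lay := by
  cases sent <;> simp [filt]

lemma filt_replicate (k : Nat) : ∀ (sent : List Int) (lay : List Bool),
    filt sent (List.replicate k false ++ lay) = sent.take k ++ filt (sent.drop k) lay := by
  induction k with
  | zero => intro sent lay; simp
  | succ k ih =>
    intro sent lay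
    cases sent with
    | nil => simp [filt_nil]
    | cons x xs => simpa [List.replicate_succ, filt] using ih xs lay

lemma filt_lay_nil (sent : List Int) : filt sent [] = [] := by
  simp [filt]

lemma filt_drop_true (sent : List Int) (c : Nat) (lay : List Bool) :
    filt (sent.drop c) (true :: lay) = filt (sent.drop (c+1)) lay := by
  rw [filt_true, List.tail_drop]

lemma walk_eq_filt : ∀ (rest : List Int) (sent : List Int) (c : Nat),
    walkSpec sent c rest = filt (sent.drop c) (layoutSpec rest) := by
  intro rest
  induction rest with
  | nil => intro sent c; simp [walkSpec, layoutSpec, filt]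
  | cons l rest ih =>
    intro sent c
    cases rest with
    | nil =>
      show (sent.drop (c+1)).take l.toNat ++ (if ([] : List Int).isEmpty then _ else _)
        = filt (sent.drop c) (layoutSpec [l])
      rw [show layoutSpec [l] = true :: (List.replicate l.toNat false ++ [true]) from rfl,
        filt_drop_true, filt_replicate]
      simp [filt_true, filt_lay_nil]
    | cons r rs =>
      show (sent.drop (c+1)).take l.toNat ++
            (if ((r :: rs) : List Int).isEmpty then _
             else (sent.drop (c+l.toNat+2)).take 1 ++ walkSpec sent (c+l.toNat+3) (r :: rs)) = _
      rw [show layoutSpec (l :: r :: rs)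
            = true :: ((List.replicate l.toNat false ++ [true] ++ [false]) ++ layoutSpec (r :: rs)) from rfl,
        filt_drop_true]
      rw [show (List.replicate l.toNat false ++ [true] ++ [false]) ++ layoutSpec (r :: rs)
            = List.replicate l.toNat false ++ (true :: (false :: layoutSpec (r :: rs))) from by simp]
      rw [filt_replicate, List.drop_drop,
        show c + 1 + l.toNat = c + l.toNat + 1 from by omega,
        filt_drop_true, filt_false, List.drop_drop]
      rw [show c + l.toNat + 1 + 1 + 1 = c + l.toNat + 3 from by omega]
      rw [ih sent (c + l.toNat + 3)]
      simp [show c + l.toNat + 1 + 1 = c + l.toNat + 2 from by omega]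

lemma alt_aux (sent : List Int) (bigL : List Int) :
    ∀ (rest : List Int) (s : Int) (content : List Int) (c : Nat), s + rest.length = (bigL.length : Int) →
    ((PySem.List.enumerate rest s).foldl
      (fun (st : List Int × Int) p =>
        let n : Int := if p.2 > 0 then p.2 else 0
        let cur := st.2 + 1
        let content := st.1 ++ PySem.List.slice sent (some cur) (some (cur + n))
        let cur := cur + n + 1
        if p.1 ≠ (bigL.length : Int) - 1 then
          (content ++ PySem.List.slice sent (some cur) (some (cur + 1)), cur + 1)
        else (content, cur))
      (content, (c : Int))).1
    = content ++ walkSpec sent c rest := by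
  intro rest
  induction rest with
  | nil => intro s content c _; simp [PySem.List.enumerate_nil, walkSpec]
  | cons l rest ih =>
    intro s content c hs
    rw [PySem.List.enumerate_cons]
    simp only [List.foldl_cons]
    have hn : (if (l : Int) > 0 then l else 0) = ((l.toNat : Nat) : Int) := by
      rw [Int.ofNat_toNat]; omega
    have hslice1 : PySem.List.slice sent (some ((c : Int) + 1)) (some ((c : Int) + 1 + ((l.toNat : Nat) : Int)))
        = (sent.drop (c + 1)).take l.toNat := by
      rw [show ((c : Int) + 1) = (((c + 1 : Nat) : Nat) : Int) from by push_cast; ring]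
      exact PySem.List.slice_natCast_add sent (c+1) l.toNat
    cases rest with
    | nil =>
      have hcond : ¬ s ≠ (bigL.length : Int) - 1 := by simp at hs; omega
      simp only [hn, hslice1, if_neg hcond, PySem.List.enumerate_nil, List.foldl_nil]
      simp [walkSpec]
    | cons r rs =>
      have hcond : s ≠ (bigL.length : Int) - 1 := by simp at hs; omega
      have hslice2 : PySem.List.slice sent (some ((c : Int) + 1 + ((l.toNat : Nat) : Int) + 1))
            (some ((c : Int) + 1 + ((l.toNat : Nat) : Int) + 1 + 1))
          = (sent.drop (c + l.toNat + 2)).take 1 := by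
        rw [show ((c : Int) + 1 + ((l.toNat : Nat) : Int) + 1) = (((c + l.toNat + 2 : Nat) : Nat) : Int) from by push_cast; ring]
        exact PySem.List.slice_natCast_add sent (c + l.toNat + 2) 1
      simp only [hn, hslice1, hslice2, if_pos hcond]
      rw [show (c : Int) + 1 + ((l.toNat : Nat) : Int) + 1 + 1 = (((c + l.toNat + 3 : Nat) : Nat) : Int) from by push_cast; ring]
      rw [ih (s + 1) _ (c + l.toNat + 3) (by simp at hs ⊢; omega)]
      simp [walkSpec]

lemma altStripOne_eq (sent lengths : List Int) :
    altStripOne sent lengths = filt sent (pySentinelLayout lengths) := by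
  have h2 : altStripOne sent lengths = [] ++ walkSpec sent 0 lengths :=
    alt_aux sent lengths lengths 0 [] 0 (by simp)
  rw [h2, List.nil_append, walk_eq_filt, pySentinelLayout_eq, List.drop_zero]

lemma foldl_append_singleton {α β : Type} (f : α → β) :
    ∀ (l : List α) (acc : List β), l.foldl (fun acc x => acc ++ [f x]) acc = acc ++ l.map f := by
  intro l
  induction l with
  | nil => simp
  | cons x xs ih => intro acc; simp [ih]

-- ===== VERDICT (by name: the statement is the Claim_ definition above) =====
theorem strip_sentinel_deltas_per_sentence_py_spec : Claim_equal_strip_sentinel_deltas_per_sentence_py := by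
  intro pos root _
  unfold Spec_strip_sentinel_deltas_per_sentence_py
  unfold strip_sentinel_deltas_per_sentence_py strip_sentinel_deltas_per_sentence_py_alt
  have h := foldl_append_singleton
    (fun p : Int × List Int =>
      ((p.2.zip (pySentinelLayout (if p.1 < (root.length : Int) then PySem.List.pyGetD root p.1 [] else []))).filter (fun q => !q.2)).map (·.1))
    (PySem.List.enumerate pos 0) []
  simp only [List.nil_append] at h
  rw [h]
  have hfun : (fun p : Int × List Int =>
      List.map (fun x => x.1) (List.filter (fun q => !q.2)
        (p.2.zip (pySentinelLayout (if p.1 < (root.length : Int) then PySem.List.pyGetD root p.1 [] else [])))))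
    = (fun p : Int × List Int => altStripOne p.2 (if p.1 < (root.length : Int) then PySem.List.pyGetD root p.1 [] else [])) := by
    funext p
    rw [altStripOne_eq]
    rfl
  rw [hfun]
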